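-- pv_equiv track=rewrite | github.com/kweaver-ai/kweaver-core | decision-agent/agent-backend/agent-executor/app/logic/agent_core_logic_v2/evidence_llm_annotator.py | _generate_index_reference
-- ===== SOURCE A (Python) =====
-- def _generate_index_reference(text: str) -> str:
--     """
--     生成字符位置索引参考，每10个字符标记一次位置。
--
--     Args:
--         text: 待标注的文本
--
--     Returns:
--         带有索引标记的文本，每10个字符显示一次索引
--     """
--     if not text:
--         return ""
--
--     lines = []
--     index_line = []
--     text_line = []
--
--     for i, char in enumerate(text):
--         # 每10个字符标记一次索引
--         if i % 10 == 0:
--             # 补齐索引到两位数，对齐显示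
--             index_str = str(i)
--             index_line.append(index_str)
--             # 添加空格对齐（根据索引长度调整）
--             remaining = 10 - (i % 10)
--         else:
--             index_line.append(" " * len(str(i)))
--
--         text_line.append(char)
--
--         # 每80个字符换行（避免单行过长）
--         if (i + 1) % 80 == 0:
--             lines.append("".join(text_line))
--             lines.append("".join(index_line))
--             lines.append("")  # 空行分隔
--             text_line = []
--             index_line = []
--
--     # 添加剩余内容
--     if text_line:
--         lines.append("".join(text_line))
--         lines.append("".join(index_line))
--
--     return "\n".join(lines)
-- ===== SOURCE B (Python) =====
-- def _generate_index_reference(text: str) -> str: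
--     if not text:
--         return ""
--     out = []
--     n = len(text)
--     for s in range(0, n, 80):
--         block = text[s:s + 80]
--         idx = []
--         for j in range(len(block)):
--             i = s + j
--             idx.append(str(i) if i % 10 == 0 else " " * len(str(i)))
--         out.append(block)
--         out.append("".join(idx))
--         if s + 80 <= n:
--             out.append("")
--     return "\n".join(out)
-- ===== Notes on version B (the rewrite author's own statement) =====
-- stated objective: alternative
-- what changed: Replaces A's single modulo-counted character pass with mutable line buffers and flush-on-(i+1)%80 by an outer loop over 80-char block slices that emits each block's text line and index line directly (inner loop over absolute indices s+j), appending the separating blank line exactly when the block is full.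
import Mathlib
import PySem

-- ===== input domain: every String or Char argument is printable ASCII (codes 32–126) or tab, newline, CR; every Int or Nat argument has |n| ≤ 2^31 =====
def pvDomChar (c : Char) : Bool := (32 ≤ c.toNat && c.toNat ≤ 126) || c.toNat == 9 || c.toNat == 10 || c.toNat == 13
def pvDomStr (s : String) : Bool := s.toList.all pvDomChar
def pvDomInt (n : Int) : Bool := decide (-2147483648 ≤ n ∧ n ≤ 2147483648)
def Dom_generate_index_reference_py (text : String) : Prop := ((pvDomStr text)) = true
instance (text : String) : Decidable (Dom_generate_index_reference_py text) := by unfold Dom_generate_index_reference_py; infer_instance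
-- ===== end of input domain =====

-- B re-decomposes the single modulo-counted pass into an outer loop over 80-char blocks
-- with an inner absolute-index loop (objective: alternative decomposition, same cost).

-- ===== PORT A =====
-- index token for absolute position i: str(i) if i%10==0 else " "*len(str(i))
def tokA (i : Nat) : List Char :=
  if i % 10 = 0 then PySem.Int.toChars (i : Int)
  else List.replicate (PySem.Int.toChars (i : Int)).length ' '

-- enumerate(text) starting at s (s = 0 at the top call)
def enumFrom : Nat → List Char → List (Nat × Char)
  | _, [] => []
  | s, c :: cs => (s, c) :: enumFrom (s + 1) cs

-- one iteration of A's for-loop; state = (lines, index_line, text_line)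
def genA_step (st : List (List Char) × List (List Char) × List Char) (p : Nat × Char) :
    List (List Char) × List (List Char) × List Char :=
  match st, p with
  | (L, il, tl), (i, c) =>
    let il' := il ++ [tokA i]
    let tl' := tl ++ [c]
    if (i + 1) % 80 = 0 then (L ++ [tl', il'.flatten, []], [], [])
    else (L, il', tl')

def generate_index_reference_py (text : String) : String :=
  if text.toList = [] then ""
  else
    match (enumFrom 0 text.toList).foldl genA_step ([], [], []) with
    | (L, il, tl) =>
      String.mk (List.intercalate ['\n']
        (if tl ≠ [] then L ++ [tl, il.flatten] else L))

-- ===== PORT B =====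
def tokB (i : Nat) : List Char :=
  if i % 10 = 0 then PySem.Int.toChars (i : Int)
  else List.replicate (PySem.Int.toChars (i : Int)).length ' '

-- outer loop over 80-char blocks; cs is text[s:], block = cs.take 80 = text[s:s+80];
-- `80 ≤ cs.length` is Python's `s + 80 <= n`
def genB_go (s : Nat) (cs : List Char) : List (List Char) :=
  if h : cs = [] then []
  else
    let block := cs.take 80
    let idx := ((List.range block.length).map (fun j => tokB (s + j))).flatten
    [block, idx] ++ (if 80 ≤ cs.length then [([] : List Char)] else []) ++ genB_go (s + 80) (cs.drop 80)
termination_by cs.length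
decreasing_by
  simp only [List.length_drop]
  have := List.length_pos_iff.mpr h
  omega

def generate_index_reference_py_alt (text : String) : String :=
  if text.toList = [] then ""
  else String.mk (List.intercalate ['\n'] (genB_go 0 text.toList))

-- ===== PRECONDITION & SPEC =====
def Spec_generate_index_reference_py (text : String) (out : String) : Prop := out = generate_index_reference_py_alt text
instance (text : String) (out : String) : Decidable (Spec_generate_index_reference_py text out) := by unfold Spec_generate_index_reference_py; infer_instance

-- ===== CLAIM (what is proved, stated in full; the proofs are below) =====
def Claim_equal_generate_index_reference_py : Prop := ∀ (text : String), Dom_generate_index_reference_py text → Spec_generate_index_reference_py text (generate_index_reference_py text)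

-- ===== LEMMAS AND PROOFS =====

theorem tokA_eq_tokB : tokA = tokB := rfl

-- the final "if text_line: lines.append(...)" of A, as a function of the loop state
def finishA (st : List (List Char) × List (List Char) × List Char) : List (List Char) :=
  if st.2.2 ≠ [] then st.1 ++ [st.2.2, st.2.1.flatten] else st.1

theorem enumFrom_append (xs ys : List Char) (s : Nat) :
    enumFrom s (xs ++ ys) = enumFrom s xs ++ enumFrom (s + xs.length) ys := by
  induction xs generalizing s with
  | nil => simp [enumFrom]
  | cons c xs ih =>
      simp [enumFrom, ih (s + 1)]
      have : s + 1 + xs.length = s + (xs.length + 1) := by omega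
      rw [this]

-- a segment of A's loop that never hits the (i+1)%80==0 flush just accumulates
theorem noflush (cs : List Char) : ∀ (s : Nat) (L il : List (List Char)) (tl : List Char),
    (∀ j, j < cs.length → (s + j + 1) % 80 ≠ 0) →
    (enumFrom s cs).foldl genA_step (L, il, tl)
      = (L, il ++ (List.range cs.length).map (fun j => tokA (s + j)), tl ++ cs) := by
  induction cs with
  | nil => intro s L il tl _; simp [enumFrom]
  | cons c cs ih =>
      intro s L il tl h
      have h0 : (s + 1) % 80 ≠ 0 := by
        have := h 0 (by simp); simpa using this
      simp only [enumFrom, List.foldl_cons]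
      rw [show genA_step (L, il, tl) (s, c)
            = (L, il ++ [tokA s], tl ++ [c]) by
          simp [genA_step, h0]]
      rw [ih (s + 1) L (il ++ [tokA s]) (tl ++ [c])
          (by
            intro j hj
            have h' := h (j + 1) (by simpa using Nat.succ_lt_succ hj)
            have e : s + 1 + j + 1 = s + (j + 1) + 1 := by omega
            rw [e]; exact h')]
      have hmap : [tokA s] ++ (List.range cs.length).map (fun j => tokA (s + 1 + j))
          = (List.range (cs.length + 1)).map (fun j => tokA (s + j)) := by
        rw [List.range_succ_eq_map, List.map_cons, List.map_map]
        simp only [Nat.add_zero, List.singleton_append]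
        congr 1
        apply List.map_congr_left
        intro j _
        simp only [Function.comp]
        congr 1
        omega
      rw [List.append_assoc, hmap]
      simp

theorem mainAux (n : Nat) : ∀ (cs : List Char) (s : Nat) (L : List (List Char)),
    cs.length ≤ n → s % 80 = 0 →
    finishA ((enumFrom s cs).foldl genA_step (L, [], [])) = L ++ genB_go s cs := by
  induction n with
  | zero =>
      intro cs s L hlen _
      have : cs = [] := List.eq_nil_of_length_eq_zero (by omega)
      subst this
      rw [genB_go.eq_def]
      simp [enumFrom, finishA]
  | succ n ih =>
      intro cs s L hlen hs
      match cs with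
      | [] =>
        rw [genB_go.eq_def]
        simp [enumFrom, finishA]
      | c :: cs' =>
        by_cases hbig : 80 ≤ (c :: cs').length
        · -- full block: split off take 80 = take 79 ++ [d], flush at i = s+79, recurse
          set cs := c :: cs' with hcs
          set t := cs.take 80 with ht
          have htlen : t.length = 80 := by simp [ht]; omega
          have hsplit : cs = t ++ cs.drop 80 := (List.take_append_drop 80 cs).symm
          have ht79 : (t.drop 79).length = 1 := by simp [List.length_drop, htlen]
          obtain ⟨d, hd⟩ : ∃ d, t.drop 79 = [d] := by
            match hm : t.drop 79 with
            | [d] => exact ⟨d, rfl⟩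
            | [] => rw [hm] at ht79; simp at ht79
            | _ :: _ :: _ => rw [hm] at ht79; simp at ht79
          have htsplit : t = t.take 79 ++ [d] := by rw [← hd, List.take_append_drop]
          have ht79len : (t.take 79).length = 79 := by simp [htlen]
          rw [hsplit, enumFrom_append, List.foldl_append, htlen]
          conv_lhs => rw [htsplit, enumFrom_append, List.foldl_append, ht79len]
          rw [noflush (t.take 79) s L [] []
              (by intro j hj; rw [ht79len] at hj; omega)]
          simp only [enumFrom, List.foldl_cons, List.foldl_nil, List.nil_append]
          have hfl : (s + 79 + 1) % 80 = 0 := by omega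
          rw [ht79len]
          rw [show genA_step (L, (List.range 79).map (fun j => tokA (s + j)), t.take 79) (s + 79, d)
                = (L ++ [t.take 79 ++ [d], ((List.range 79).map (fun j => tokA (s + j)) ++ [tokA (s + 79)]).flatten, []], [], []) by
              simp [genA_step, hfl]]
          rw [ih (cs.drop 80) (s + 80) _ (by simp [List.length_drop]; omega) (by omega)]
          have hrange : (List.range 79).map (fun j => tokA (s + j)) ++ [tokA (s + 79)]
              = (List.range 80).map (fun j => tokA (s + j)) := by
            have h80 : List.range 80 = List.range 79 ++ [79] := by decide
            rw [h80, List.map_append]; simp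
          rw [hrange, ← htsplit]
          conv_rhs => rw [genB_go.eq_def]
          simp only [← hsplit, dif_neg (by simp [hcs] : cs ≠ []), if_pos hbig, ← ht, htlen, tokA_eq_tokB.symm]
          simp [List.append_assoc]
        · -- partial last block: no flush at all
          rw [noflush (c :: cs') s L [] []
              (by
                intro j hj
                simp only [List.length_cons, Nat.not_le] at hj hbig
                omega)]
          have htake : (c :: cs').take 80 = c :: cs' :=
            List.take_of_length_le (by omega)
          have hdrop : (c :: cs').drop 80 = [] :=
            List.drop_eq_nil_of_le (by simp at hbig ⊢; omega)
          conv_rhs => rw [genB_go.eq_def]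
          rw [genB_go.eq_def (s + 80)]
          simp [finishA, htake, hdrop, tokA_eq_tokB]
          simp only [List.length_cons, Nat.not_le] at hbig
          omega

-- ===== VERDICT (by name: the statement is the Claim_ definition above) =====
theorem generate_index_reference_py_spec : Claim_equal_generate_index_reference_py := by
  intro text _
  unfold Spec_generate_index_reference_py
  unfold generate_index_reference_py generate_index_reference_py_alt
  by_cases h : text.toList = []
  · simp [h]
  · simp only [if_neg h]
    have := mainAux text.toList.length text.toList 0 [] (le_refl _) (by omega)
    rcases hst : (enumFrom 0 text.toList).foldl genA_step ([], [], []) with ⟨L, il, tl⟩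
    rw [hst] at this
    simp only [finishA, List.nil_append] at this
    rw [← this]
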